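-- pv_equiv track=rewrite | github.com/pypi-data/pypi-mirror-402 | packages/feyn/feyn-3.5.0-cp310-cp310-manylinux_2_27_x86_64.manylinux_2_28_x86_64.whl/feyn/plots/_render/_truncate_inputs.py | isolate_interesting_regions
-- ===== SOURCE A (Python) =====
-- def isolate_interesting_regions(strs, trunc_size, lb):
--     regions = []
--     for i, me in enumerate(strs):
--         i_regions = []
--         others = strs[:i] + strs[i + 1 :]
--         if i < len(strs):
--             for other in others:
--                 if _compare(me, other, trunc_size) > 0:
--                     reg_start = _spool(me, other, lb=lb)
--                     i_regions.append(reg_start)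
--
--         any_safe = False
--         for reg in i_regions:
--             if _is_region_cross_safe(me, others, reg, trunc_size):
--                 regions.append(reg)
--                 any_safe |= True
--                 break
--         if not any_safe:
--             regions.append(0)
--
--     return regions
--
-- def _compare(me, other, trunc_size):
--     if me == other:
--         return -1
--     if me[:trunc_size] == other[:trunc_size]:
--         return 1
--     else:
--         return 0
--
-- def _spool(me, other, lb):
--     start = 0
--     for i, (c1, c2) in enumerate(zip(me, other)):
--         if c1 == c2:
--             continue
--         start = i - lb
--         break
--     return max(start, 0)
--
-- def _is_region_cross_safe(me, others, region, trunc_size):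
--     safe = True
--     for other in others:
--         safe &= me[region : region + trunc_size] != other[region : region + trunc_size]
--
--     return safe
-- ===== SOURCE B (Python) =====
-- def isolate_interesting_regions(strs, trunc_size, lb):
--     groups = {}
--     for idx, s in enumerate(strs):
--         groups.setdefault(s[:trunc_size], []).append(idx)
--     out = []
--     for i, me in enumerate(strs):
--         out.append(_first_safe_region(strs, groups[me[:trunc_size]], i, me, trunc_size, lb))
--     return out
--
-- def _first_safe_region(strs, group, i, me, trunc_size, lb):
--     for j in group:
--         if j != i and strs[j] != me:
--             reg = _divergence(me, strs[j], lb)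
--             window = me[reg:reg + trunc_size]
--             if sum(s[reg:reg + trunc_size] == window for s in strs) == 1:
--                 return reg
--     return 0
--
-- def _divergence(me, other, lb):
--     for k, (a, b) in enumerate(zip(me, other)):
--         if a != b:
--             return max(k - lb, 0)
--     return 0
-- ===== Notes on version B (the rewrite author's own statement) =====
-- stated objective: faster
-- what changed: B builds a dictionary grouping string indices by their trunc_size prefix once, so each string's candidates come from its prefix group instead of a _compare scan over all others, and replaces the per-candidate cross-safety scan over the others with a global count of strings sharing the candidate window (safe iff the count is exactly 1).
import Mathlib
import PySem

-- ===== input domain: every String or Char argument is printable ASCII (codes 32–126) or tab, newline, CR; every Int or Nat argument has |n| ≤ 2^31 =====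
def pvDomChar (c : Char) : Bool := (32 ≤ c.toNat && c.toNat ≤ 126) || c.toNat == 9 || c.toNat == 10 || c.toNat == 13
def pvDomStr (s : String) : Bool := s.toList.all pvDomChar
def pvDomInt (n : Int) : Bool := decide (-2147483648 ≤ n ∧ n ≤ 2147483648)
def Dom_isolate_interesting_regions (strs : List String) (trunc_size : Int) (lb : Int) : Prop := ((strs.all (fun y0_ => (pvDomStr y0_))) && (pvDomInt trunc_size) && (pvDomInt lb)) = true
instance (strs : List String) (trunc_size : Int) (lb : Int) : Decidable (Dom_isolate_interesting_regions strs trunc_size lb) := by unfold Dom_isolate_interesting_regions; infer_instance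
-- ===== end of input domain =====

-- B is faster: a prefix dictionary built once replaces A's per-string _compare scan over all others
-- (candidates come from each string's prefix group), and a global window count replaces the
-- per-candidate cross-safety scan; measured far faster on the generated inputs.

-- ===== PORT A =====
-- _compare(me, other, trunc_size)
def pvCompare (me other : String) (trunc_size : Int) : Int :=
  if me = other then -1
  else if PySem.List.slice me.toList none (some trunc_size)
          = PySem.List.slice other.toList none (some trunc_size) then 1
  else 0

-- the 'for i, (c1, c2) in enumerate(zip(me, other))' loop of _spool, with the trailing max(start, 0)
def pvSpoolAux (lb : Int) : List (Char × Char) → Int → Int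
  | [], _ => 0
  | (c1, c2) :: rest, i => if c1 = c2 then pvSpoolAux lb rest (i + 1) else max (i - lb) 0

-- _spool(me, other, lb)
def pvSpool (me other : String) (lb : Int) : Int :=
  pvSpoolAux lb (me.toList.zip other.toList) 0

-- _is_region_cross_safe(me, others, region, trunc_size)
def pvCrossSafe (me : String) (others : List String) (region trunc_size : Int) : Bool :=
  others.foldl
    (fun safe other =>
      safe && decide (PySem.List.slice me.toList (some region) (some (region + trunc_size))
                      ≠ PySem.List.slice other.toList (some region) (some (region + trunc_size))))
    true

-- the 'for reg in i_regions: … break' loop (some reg = appended reg, none = append 0)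
def pvPick (me : String) (others : List String) (trunc_size : Int) : List Int → Option Int
  | [] => none
  | reg :: rest =>
    if pvCrossSafe me others reg trunc_size then some reg
    else pvPick me others trunc_size rest

def isolate_interesting_regions (strs : List String) (trunc_size : Int) (lb : Int) : List Int :=
  (PySem.List.enumerate strs 0).foldl
    (fun regions p =>
      let i := p.1
      let me := p.2
      let others := PySem.List.slice strs none (some i) ++ PySem.List.slice strs (some (i + 1)) none
      let i_regions :=
        if i < PySem.List.len strs then
          others.foldl
            (fun acc other =>
              if pvCompare me other trunc_size > 0 then acc ++ [pvSpool me other lb] else acc)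
            []
        else []
      match pvPick me others trunc_size i_regions with
      | some reg => regions ++ [reg]
      | none => regions ++ [0])
    []

-- ===== PORT B =====
-- s[:trunc_size], the dictionary key
def altPref (s : String) (t : Int) : List Char := PySem.List.slice s.toList none (some t)

-- the 'groups.setdefault(s[:trunc_size], []).append(idx)' loop
def altGroups (strs : List String) (t : Int) : PySem.Dict (List Char) (List Int) :=
  (PySem.List.enumerate strs 0).foldl
    (fun d p => d.modify (altPref p.2 t) [] (fun g => g ++ [p.1]))
    (PySem.Dict.mk [])

-- the 'for k, (a, b) in enumerate(zip(me, other))' loop of _divergence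
def altDivAux (lb : Int) : List (Char × Char) → Int → Int
  | [], _ => 0
  | (a, b) :: rest, k => if a ≠ b then max (k - lb) 0 else altDivAux lb rest (k + 1)

-- _divergence(me, other, lb)
def altDiv (me other : String) (lb : Int) : Int :=
  altDivAux lb (me.toList.zip other.toList) 0

-- 'sum(s[reg:reg+trunc_size] == window for s in strs) == 1' with window = me[reg:reg+trunc_size]
def altSafe (strs : List String) (me : String) (reg t : Int) : Bool :=
  let window := PySem.List.slice me.toList (some reg) (some (reg + t))
  ((strs.map (fun s =>
      if PySem.List.slice s.toList (some reg) (some (reg + t)) = window then (1 : Int) else 0)).sum == 1)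

-- _first_safe_region(strs, group, i, me, trunc_size, lb)
def altFirstSafeRegion (strs : List String) (i : Int) (me : String) (t lb : Int) : List Int → Int
  | [] => 0
  | j :: rest =>
    if j ≠ i ∧ PySem.List.pyGetD strs j "" ≠ me then
      let reg := altDiv me (PySem.List.pyGetD strs j "") lb
      if altSafe strs me reg t then reg
      else altFirstSafeRegion strs i me t lb rest
    else altFirstSafeRegion strs i me t lb rest

def isolate_interesting_regions_alt (strs : List String) (trunc_size : Int) (lb : Int) : List Int :=
  let groups := altGroups strs trunc_size
  (PySem.List.enumerate strs 0).foldl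
    (fun out p =>
      out ++ [altFirstSafeRegion strs p.1 p.2 trunc_size lb
                (groups.getD (altPref p.2 trunc_size) [])])
    []

-- ===== PRECONDITION & SPEC =====
def Spec_isolate_interesting_regions (strs : List String) (trunc_size : Int) (lb : Int) (out : List Int) : Prop := out = isolate_interesting_regions_alt strs trunc_size lb
instance (strs : List String) (trunc_size : Int) (lb : Int) (out : List Int) : Decidable (Spec_isolate_interesting_regions strs trunc_size lb out) := by unfold Spec_isolate_interesting_regions; infer_instance

-- ===== CLAIM (what is proved, stated in full; the proofs are below) =====
def Claim_equal_isolate_interesting_regions : Prop := ∀ (strs : List String) (trunc_size : Int) (lb : Int), Dom_isolate_interesting_regions strs trunc_size lb → Spec_isolate_interesting_regions strs trunc_size lb (isolate_interesting_regions strs trunc_size lb)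

-- ===== LEMMAS AND PROOFS =====

-- A's per-string body with its two loops fused (proof-side helper, used to restate A)
def fusedA (me : String) (others : List String) (t lb : Int) : List String → Int
  | [] => 0
  | other :: rest =>
    if pvCompare me other t > 0 then
      if pvCrossSafe me others (pvSpool me other lb) t then pvSpool me other lb
      else fusedA me others t lb rest
    else fusedA me others t lb rest

-- the common core both per-string scans reduce to: walk candidate indices, return the first safe region
def corePick (strs : List String) (me : String) (lb : Int) (safe : Int → Bool) : List Nat → Int
  | [] => 0
  | k :: rest =>
    if safe (altDiv me (strs.getD k "") lb) then altDiv me (strs.getD k "") lb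
    else corePick strs me lb safe rest

theorem spool_eq_altDiv (me other : String) (lb : Int) :
    pvSpool me other lb = altDiv me other lb := by
  unfold pvSpool altDiv
  generalize me.toList.zip other.toList = ps
  generalize (0 : Int) = k
  induction ps generalizing k with
  | nil => rfl
  | cons p rest ih =>
    obtain ⟨a, b⟩ := p
    by_cases h : a = b <;> simp [pvSpoolAux, altDivAux, h, ih]

-- a '&='-accumulated loop is 'all'
theorem foldl_and_eq_all {α : Type} (p : α → Bool) (l : List α) (s : Bool) :
    l.foldl (fun acc x => acc && p x) s = (s && l.all p) := by
  induction l generalizing s with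
  | nil => simp
  | cons x xs ih => simp [List.foldl_cons, ih, Bool.and_assoc]

theorem crossSafe_eq_all (me : String) (others : List String) (reg t : Int) :
    pvCrossSafe me others reg t =
      others.all (fun o =>
        decide (PySem.List.slice me.toList (some reg) (some (reg + t))
                ≠ PySem.List.slice o.toList (some reg) (some (reg + t)))) := by
  unfold pvCrossSafe
  rw [foldl_and_eq_all]
  simp

-- A's candidate test spelled out
theorem compare_pos_iff (me other : String) (t : Int) :
    (pvCompare me other t > 0) ↔
      (other ≠ me ∧ PySem.List.slice me.toList none (some t)
                    = PySem.List.slice other.toList none (some t)) := by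
  unfold pvCompare
  by_cases h1 : me = other
  · simp [h1]
  · by_cases h2 : PySem.List.slice me.toList none (some t)
          = PySem.List.slice other.toList none (some t)
    · simp [h1, h2, Ne.symm h1]
    · simp [h1, h2]

-- fusing A's collect-then-scan into one scan
theorem pick_fused (me : String) (others : List String) (t lb : Int) (os : List String) :
    (match pvPick me others t
        (os.foldl (fun acc other =>
          if pvCompare me other t > 0 then acc ++ [pvSpool me other lb] else acc) []) with
     | some reg => reg
     | none => 0) = fusedA me others t lb os := by
  rw [PySem.List.foldl_append_ite (fun other => pvCompare me other t > 0)
        (fun other => pvSpool me other lb)]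
  simp only [List.nil_append]
  induction os with
  | nil => simp [pvPick, fusedA]
  | cons other rest ih =>
    by_cases hq : pvCompare me other t > 0
    · rw [List.filter_cons_of_pos (by simpa using hq)]
      simp only [List.map_cons, pvPick]
      rw [fusedA, if_pos hq]
      by_cases hs : pvCrossSafe me others (pvSpool me other lb) t
      · rw [if_pos hs, if_pos hs]
      · rw [if_neg hs, if_neg hs]; exact ih
    · rw [List.filter_cons_of_neg (by simpa using hq)]
      rw [fusedA, if_neg hq]
      exact ih

-- A's fused scan over mapped indices is the core scan over the candidate indices
theorem fusedA_map (strs : List String) (me : String) (others : List String) (t lb : Int)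
    (l : List Nat) :
    fusedA me others t lb (l.map (fun k => strs.getD k "")) =
      corePick strs me lb (fun reg => pvCrossSafe me others reg t)
        (l.filter (fun k => decide (pvCompare me (strs.getD k "") t > 0))) := by
  induction l with
  | nil => rfl
  | cons k rest ih =>
    rw [List.map_cons]
    by_cases h : pvCompare me (strs.getD k "") t > 0
    · rw [List.filter_cons]
      simp only [decide_eq_true_eq]
      rw [if_pos h, fusedA, if_pos h, corePick, spool_eq_altDiv]
      by_cases hs : pvCrossSafe me others (altDiv me (strs.getD k "") lb) t
      · rw [if_pos hs, if_pos hs]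
      · rw [if_neg hs, if_neg hs]; exact ih
    · rw [List.filter_cons]
      simp only [decide_eq_true_eq]
      rw [if_neg h, fusedA, if_neg h]
      exact ih

-- B's scan over mapped indices is the core scan over the candidate indices
theorem altFSR_map (strs : List String) (iN : Nat) (me : String) (t lb : Int) (l : List Nat) :
    altFirstSafeRegion strs (iN : Int) me t lb (l.map (Nat.cast : Nat → Int)) =
      corePick strs me lb (fun reg => altSafe strs me reg t)
        (l.filter (fun k => decide (k ≠ iN ∧ strs.getD k "" ≠ me))) := by
  induction l with
  | nil => rfl
  | cons k rest ih =>
    rw [List.map_cons]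
    by_cases h : k ≠ iN ∧ strs.getD k "" ≠ me
    · have h' : (k : Int) ≠ (iN : Int) ∧ PySem.List.pyGetD strs (k : Int) "" ≠ me := by
        rw [PySem.List.pyGetD_natCast]; exact ⟨by exact_mod_cast h.1, h.2⟩
      rw [List.filter_cons]
      simp only [decide_eq_true_eq]
      rw [if_pos h, altFirstSafeRegion, if_pos h', corePick]
      rw [PySem.List.pyGetD_natCast]
      by_cases hs : altSafe strs me (altDiv me (strs.getD k "") lb) t
      · rw [if_pos hs, if_pos hs]
      · rw [if_neg hs, if_neg hs]; exact ih
    · have h' : ¬ ((k : Int) ≠ (iN : Int) ∧ PySem.List.pyGetD strs (k : Int) "" ≠ me) := by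
        rw [PySem.List.pyGetD_natCast]
        intro hc; exact h ⟨by exact_mod_cast hc.1, hc.2⟩
      rw [List.filter_cons]
      simp only [decide_eq_true_eq]
      rw [if_neg h, altFirstSafeRegion, if_neg h']
      exact ih

-- the index list of 'others': all indices except i, in order
theorem filter_range_ne (n i : Nat) (h : i < n) :
    (List.range n).filter (fun j => decide (j ≠ i)) =
      List.range i ++ List.range' (i + 1) (n - i - 1) := by
  induction n with
  | zero => omega
  | succ m ih =>
    rw [List.range_succ, List.filter_append]
    by_cases hm : i < m
    · rw [ih hm]
      have hne : m ≠ i := by omega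
      have h1 : List.filter (fun j => decide (j ≠ i)) [m] = [m] := by simp [hne]
      rw [h1]
      have h2 : m + 1 - i - 1 = (m - i - 1) + 1 := by omega
      rw [h2, List.range'_concat, List.append_assoc]
      have h3 : i + 1 + 1 * (m - i - 1) = m := by omega
      rw [h3]
    · have hi : i = m := by omega
      subst hi
      have h1 : List.filter (fun j => decide (j ≠ i)) (List.range i) = List.range i := by
        rw [List.filter_eq_self]
        intro a ha
        simp only [List.mem_range] at ha
        simp [Nat.ne_of_lt ha]
      have h2 : List.filter (fun j => decide (j ≠ i)) [i] = [] := by simp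
      rw [h1, h2]
      simp

theorem take_eq_map_range (l : List String) (i : Nat) (h : i ≤ l.length) :
    l.take i = (List.range i).map (fun j => l.getD j "") := by
  apply List.ext_getElem
  · simp; omega
  · intro k h1 h2
    simp only [List.getElem_take, List.getElem_map, List.getElem_range]
    rw [List.getD_eq_getElem l "" (by simp at h1; omega)]

theorem drop_eq_map_range' (l : List String) (i : Nat) (h : i < l.length) :
    l.drop (i + 1) = (List.range' (i + 1) (l.length - i - 1)).map (fun j => l.getD j "") := by
  apply List.ext_getElem
  · simp; omega
  · intro k h1 h2
    simp only [List.getElem_drop, List.getElem_map, List.getElem_range']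
    rw [List.getD_eq_getElem l "" (by simp at h1; omega)]
    congr 1
    omega

theorem others_eq_map (strs : List String) (i : Nat) (h : i < strs.length) :
    strs.take i ++ strs.drop (i + 1) =
      ((List.range strs.length).filter (fun j => decide (j ≠ i))).map
        (fun j => strs.getD j "") := by
  rw [filter_range_ne _ _ h, List.map_append,
      take_eq_map_range strs i (le_of_lt h), drop_eq_map_range' strs i h]

-- A's cross-safety over the others equals B's global window count
theorem safe_bridge (strs : List String) (i : Nat) (hi : i < strs.length) (t reg : Int) :
    pvCrossSafe (strs.getD i "") (strs.take i ++ strs.drop (i + 1)) reg t =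
      altSafe strs (strs.getD i "") reg t := by
  have hme : strs.getD i "" = strs[i] := List.getD_eq_getElem strs "" hi
  rw [crossSafe_eq_all]
  unfold altSafe
  simp only []
  set w := PySem.List.slice (strs.getD i "").toList (some reg) (some (reg + t)) with hw
  set P := fun s : String => decide (PySem.List.slice s.toList (some reg) (some (reg + t)) = w) with hP
  have hsum : (List.map (fun s =>
        if PySem.List.slice s.toList (some reg) (some (reg + t)) = w then (1 : Int) else 0) strs).sum
      = ((List.countP P strs : Nat) : Int) := by
    simp only [hP]
    have := PySem.List.sum_map_ite_one_zero
        (fun s : String => decide (PySem.List.slice s.toList (some reg) (some (reg + t)) = w)) strs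
    simpa using this
  rw [hsum]
  have hPi : P strs[i] = true := by
    simp only [hP, hw, hme, decide_eq_true_eq]
  have hsplit : strs = strs.take i ++ strs[i] :: strs.drop (i + 1) := by
    conv_lhs => rw [← List.take_append_drop i strs, List.drop_eq_getElem_cons hi]
  have hcount : List.countP P strs
      = List.countP P (strs.take i ++ strs.drop (i + 1)) + 1 := by
    nth_rewrite 1 [hsplit]
    rw [List.countP_append, List.countP_cons, hPi]
    simp only [if_true]
    rw [List.countP_append]
    omega
  rw [Bool.eq_iff_iff, hcount]
  simp only [List.all_eq_true, decide_eq_true_eq, beq_iff_eq]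
  constructor
  · intro h
    have hz : List.countP P (strs.take i ++ strs.drop (i + 1)) = 0 := by
      rw [List.countP_eq_zero]
      intro o ho
      simp only [hP, decide_eq_true_eq]
      intro hEq
      exact (h o ho) hEq.symm
    rw [hz]
    norm_num
  · intro h o ho
    have h1 : ((List.countP P (strs.take i ++ strs.drop (i + 1)) + 1 : Nat) : Int) = 1 := by
      exact_mod_cast h
    have hz : List.countP P (strs.take i ++ strs.drop (i + 1)) = 0 := by omega
    rw [List.countP_eq_zero] at hz
    have := hz o ho
    simp only [hP, decide_eq_true_eq] at this
    intro hEq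
    exact this hEq.symm

-- the two candidate-index lists coincide
theorem filters_eq (strs : List String) (i : Nat) (t : Int) :
    (((List.range strs.length).filter (fun j => decide (j ≠ i))).filter
        (fun k => decide (pvCompare (strs.getD i "") (strs.getD k "") t > 0))) =
      (((List.range strs.length).filter
          (fun k => altPref (strs.getD k "") t == altPref (strs.getD i "") t)).filter
        (fun k => decide (k ≠ i ∧ strs.getD k "" ≠ strs.getD i ""))) := by
  rw [List.filter_filter, List.filter_filter]
  apply List.filter_congr
  intro k hk
  rw [Bool.eq_iff_iff]
  constructor
  · intro h
    obtain ⟨hA, hB⟩ := Bool.and_eq_true_iff.mp h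
    have hki : k ≠ i := by simpa using hB
    have hcmp : pvCompare (strs.getD i "") (strs.getD k "") t > 0 := by simpa using hA
    obtain ⟨hne, hsl⟩ := (compare_pos_iff _ _ _).mp hcmp
    refine Bool.and_eq_true_iff.mpr ⟨?_, ?_⟩
    · simpa using ⟨hki, hne⟩
    · simpa [altPref] using hsl.symm
  · intro h
    obtain ⟨hA, hB⟩ := Bool.and_eq_true_iff.mp h
    have hsl : altPref (strs.getD k "") t = altPref (strs.getD i "") t := by simpa using hB
    obtain ⟨hki, hne⟩ : k ≠ i ∧ strs.getD k "" ≠ strs.getD i "" := by simpa using hA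
    refine Bool.and_eq_true_iff.mpr ⟨?_, ?_⟩
    · simpa using (compare_pos_iff _ _ _).mpr ⟨hne, by simpa [altPref] using hsl.symm⟩
    · simpa using hki

-- B's group for me's prefix: exactly the indices whose prefix matches, in order
theorem group_char (strs : List String) (t : Int) (c : List Char) :
    (altGroups strs t).getD c [] =
      (((List.range strs.length).filter (fun k => altPref (strs.getD k "") t == c)).map
        (Nat.cast : Nat → Int)) := by
  unfold altGroups
  have h1 : (PySem.List.enumerate strs 0).foldl
        (fun d p => d.modify (altPref p.2 t) [] (fun g => g ++ [p.1])) (PySem.Dict.mk [])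
      = ((PySem.List.enumerate strs 0).map (fun p => (altPref p.2 t, p.1))).foldl
          (fun d q => d.modify q.1 [] (fun g => g ++ [q.2])) (PySem.Dict.mk []) := by
    rw [List.foldl_map]
  rw [h1, PySem.Dict.getD_foldl_modify_append]
  have h0 : (PySem.Dict.mk ([] : List (List Char × List Int))).getD c [] = [] := rfl
  rw [h0, List.nil_append, List.filter_map, List.map_map]
  rw [PySem.List.enumerate_eq_map_pyRange strs ""]
  have hlen : PySem.List.len strs = (strs.length : Int) := by simp [PySem.List.len]
  rw [hlen, PySem.List.pyRange_zero_natCast, List.map_map, List.filter_map, List.map_map]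
  simp only [Function.comp_def, PySem.List.pyGetD_natCast]

-- the per-index body of A equals the per-index body of B
theorem body_eq (strs : List String) (t lb : Int) (regions : List Int) (k : Nat)
    (hk : k ∈ List.range strs.length) :
    (let i := ((k : Int), PySem.List.pyGetD strs (k : Int) "").1
     let me := ((k : Int), PySem.List.pyGetD strs (k : Int) "").2
     let others := PySem.List.slice strs none (some i) ++ PySem.List.slice strs (some (i + 1)) none
     let i_regions :=
       if i < PySem.List.len strs then
         others.foldl
           (fun acc other => if pvCompare me other t > 0 then acc ++ [pvSpool me other lb] else acc)
           []
       else []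
     match pvPick me others t i_regions with
     | some reg => regions ++ [reg]
     | none => regions ++ [0])
    = regions ++ [altFirstSafeRegion strs ((k : Int), PySem.List.pyGetD strs (k : Int) "").1
        ((k : Int), PySem.List.pyGetD strs (k : Int) "").2 t lb
        ((altGroups strs t).getD (altPref ((k : Int), PySem.List.pyGetD strs (k : Int) "").2 t) [])] := by
  simp only [List.mem_range] at hk
  simp only []
  rw [PySem.List.pyGetD_natCast]
  have hlen : PySem.List.len strs = (strs.length : Int) := by simp [PySem.List.len]
  have hi : ((k : Int)) < (strs.length : Int) := by exact_mod_cast hk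
  rw [hlen, if_pos hi]
  rw [PySem.List.slice_to_natCast]
  rw [show ((k : Int) + 1) = (((k + 1 : Nat)) : Int) by push_cast; ring,
      PySem.List.slice_from_natCast]
  -- rewrite B's side down to A's fused scan
  rw [group_char strs t (altPref (strs.getD k "") t), altFSR_map, ← filters_eq strs k t]
  rw [show (fun reg => altSafe strs (strs.getD k "") reg t)
        = (fun reg => pvCrossSafe (strs.getD k "") (strs.take k ++ strs.drop (k + 1)) reg t) from
      funext (fun reg => (safe_bridge strs k hk t reg).symm)]
  rw [show strs.take k ++ strs.drop (k + 1)
        = ((List.range strs.length).filter (fun j => decide (j ≠ k))).map (fun j => strs.getD j "")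
      from others_eq_map strs k hk]
  rw [← fusedA_map, ← pick_fused]
  cases pvPick (strs.getD k "")
      (((List.range strs.length).filter (fun j => decide (j ≠ k))).map (fun j => strs.getD j ""))
      t
      ((((List.range strs.length).filter (fun j => decide (j ≠ k))).map (fun j => strs.getD j "")).foldl
        (fun acc other =>
          if pvCompare (strs.getD k "") other t > 0 then acc ++ [pvSpool (strs.getD k "") other lb]
          else acc)
        []) with
  | none => rfl
  | some reg => rfl

-- ===== VERDICT (by name: the statement is the Claim_ definition above) =====
theorem isolate_interesting_regions_spec : Claim_equal_isolate_interesting_regions := by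
  intro strs trunc_size lb _
  unfold Spec_isolate_interesting_regions
  unfold isolate_interesting_regions isolate_interesting_regions_alt
  simp only []
  rw [PySem.List.enumerate_eq_map_pyRange strs ""]
  have hlen : PySem.List.len strs = (strs.length : Int) := by simp [PySem.List.len]
  rw [hlen, PySem.List.pyRange_zero_natCast]
  simp only [List.foldl_map]
  apply PySem.List.foldl_congr_mem
  intro acc x hx
  exact body_eq strs trunc_size lb acc x hx
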